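-- pv_equiv track=rewrite | github.com/pe2mbs/sel_ide_runner | sel_ide_runner/commands/selenium.py | _keywordToFunction
-- ===== SOURCE A (Python) =====
-- def _keywordToFunction( keyword: str ):
--     if ' ' not in keyword:
--         return keyword
--
--     function = ''
--     space = False
--     for ch in keyword:
--         if ch == ' ':
--             space = True
--             continue
--
--         function += ch.upper() if space else ch
--
--     return function
-- ===== SOURCE B (Python) =====
-- def _keywordToFunction(keyword: str):
--     if ' ' not in keyword:
--         return keyword
--     i = keyword.index(' ')
--     return keyword[:i] + keyword[i + 1:].replace(' ', '').upper()
-- ===== Notes on version B (the rewrite author's own statement) =====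
-- stated objective: simpler
-- what changed: Replaces the char-by-char accumulation loop with a persistent space flag by slicing at the first space and bulk string methods: keep the prefix, strip spaces from and uppercase the whole remainder.
import Mathlib
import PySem

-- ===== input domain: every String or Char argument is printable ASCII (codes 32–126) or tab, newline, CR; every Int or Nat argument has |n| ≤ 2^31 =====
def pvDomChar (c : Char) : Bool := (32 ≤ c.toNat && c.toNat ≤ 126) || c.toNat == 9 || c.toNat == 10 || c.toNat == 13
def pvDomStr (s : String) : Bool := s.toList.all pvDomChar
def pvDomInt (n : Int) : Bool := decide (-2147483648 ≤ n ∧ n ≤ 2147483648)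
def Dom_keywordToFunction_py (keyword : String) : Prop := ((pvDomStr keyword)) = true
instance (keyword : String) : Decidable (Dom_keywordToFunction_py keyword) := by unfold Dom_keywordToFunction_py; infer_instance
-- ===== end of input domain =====

-- B replaces A's char-by-char loop (with a sticky space flag) by slicing at the first
-- space and bulk string methods on the remainder; objective: simpler. Return-value equivalence.

-- ===== PORT A =====
-- A's loop: state is (accumulated chars, space flag); 'function += ch.upper() if space else ch'.
def keywordToFunction_py (keyword : String) : String :=
  if PySem.Str.isIn " " keyword = false then keyword
  else
    String.ofList
      ((keyword.toList.foldl
        (fun (st : List Char × Bool) ch =>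
          if ch = ' ' then (st.1, true)
          else (st.1 ++ [if st.2 then PySem.Chars.upperChar ch else ch], st.2))
        ([], false)).1)

-- ===== PORT B =====
-- Source B: guard, i = keyword.index(' ') (guard guarantees presence, so index = find),
-- then keyword[:i] + keyword[i+1:].replace(' ', '').upper().
def keywordToFunction_py_alt (keyword : String) : String :=
  if PySem.Str.isIn " " keyword = false then keyword
  else
    let i : Int := PySem.Str.find keyword " "
    String.ofList (PySem.Chars.slice keyword.toList none (some i)) ++
      PySem.Str.upper
        (PySem.Str.replace (String.ofList (PySem.Chars.slice keyword.toList (some (i + 1)) none)) " " "")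

-- ===== PRECONDITION & SPEC =====
def Spec_keywordToFunction_py (keyword : String) (out : String) : Prop := out = keywordToFunction_py_alt keyword
instance (keyword : String) (out : String) : Decidable (Spec_keywordToFunction_py keyword out) := by unfold Spec_keywordToFunction_py; infer_instance

-- ===== CLAIM (what is proved, stated in full; the proofs are below) =====
def Claim_equal_keywordToFunction_py : Prop := ∀ (keyword : String), Dom_keywordToFunction_py keyword → Spec_keywordToFunction_py keyword (keywordToFunction_py keyword)

-- ===== LEMMAS AND PROOFS =====
theorem pv_replace_go (cs acc : List Char) (fuel : Nat) (h : cs.length ≤ fuel) :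
    PySem.Chars.replace.go [' '] [] fuel cs acc = acc.reverse ++ cs.filter (· ≠ ' ') := by
  induction fuel generalizing cs acc with
  | zero =>
    have : cs = [] := List.length_eq_zero_iff.mp (Nat.le_zero.mp h)
    subst this; simp [PySem.Chars.replace.go]
  | succ n ih =>
    cases cs with
    | nil => simp [PySem.Chars.replace.go]
    | cons c t =>
      by_cases hc : c = ' '
      · subst hc
        rw [show PySem.Chars.replace.go [' '] [] (n+1) (' ' :: t) acc
            = PySem.Chars.replace.go [' '] [] n (List.drop 1 (' ' :: t)) ([].reverse ++ acc) from by
          simp [PySem.Chars.replace.go, List.isPrefixOf]]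
        simp only [List.drop_one, List.tail_cons, List.reverse_nil, List.nil_append]
        rw [ih t acc (by simpa using h)]
        simp
      · rw [show PySem.Chars.replace.go [' '] [] (n+1) (c :: t) acc
            = PySem.Chars.replace.go [' '] [] n t (c :: acc) from by
          have hb : (' ' == c) = false := by simp [Ne.symm hc]
          simp [PySem.Chars.replace.go, List.isPrefixOf, hb]]
        rw [ih t (c :: acc) (by simpa using h)]
        simp [hc]

theorem pv_replace_space (cs : List Char) :
    PySem.Chars.replace cs [' '] [] = cs.filter (· ≠ ' ') := by
  rw [PySem.Chars.replace]
  simp [pv_replace_go cs [] cs.length (le_refl _)]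

theorem pv_find_go (pre suf : List Char) (k : Nat) (h : ' ' ∉ pre) :
    PySem.Chars.find.go [' '] (pre ++ ' ' :: suf) k = (k + pre.length : Int) := by
  induction pre generalizing k with
  | nil => simp [PySem.Chars.find.go, List.isPrefixOf]
  | cons c t ih =>
    have hc : ¬ c = ' ' := fun h' => h (h' ▸ List.mem_cons_self)
    rw [show PySem.Chars.find.go [' '] ((c :: t) ++ ' ' :: suf) k
        = PySem.Chars.find.go [' '] (t ++ ' ' :: suf) (k + 1) from by
      have hb : (' ' == c) = false := by simp [Ne.symm hc]
      simp [PySem.Chars.find.go, List.isPrefixOf, hb]]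
    rw [ih (k + 1) (fun h' => h (List.mem_cons_of_mem _ h'))]
    simp only [List.length_cons]; push_cast; ring

theorem pv_loopA_pre (pre rest : List Char) (acc : List Char) (h : ' ' ∉ pre) :
    (pre ++ rest).foldl
      (fun (st : List Char × Bool) ch =>
        if ch = ' ' then (st.1, true)
        else (st.1 ++ [if st.2 then PySem.Chars.upperChar ch else ch], st.2))
      (acc, false)
    = rest.foldl
      (fun (st : List Char × Bool) ch =>
        if ch = ' ' then (st.1, true)
        else (st.1 ++ [if st.2 then PySem.Chars.upperChar ch else ch], st.2))
      (acc ++ pre, false) := by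
  induction pre generalizing acc with
  | nil => simp
  | cons c t ih =>
    have hc : ¬ c = ' ' := fun h' => h (h' ▸ List.mem_cons_self)
    simp only [List.cons_append, List.foldl_cons, if_neg hc, Bool.false_eq_true, if_false]
    rw [ih (acc ++ [c]) (fun h' => h (List.mem_cons_of_mem _ h'))]
    simp

theorem pv_loopA_after (suf acc : List Char) :
    suf.foldl
      (fun (st : List Char × Bool) ch =>
        if ch = ' ' then (st.1, true)
        else (st.1 ++ [if st.2 then PySem.Chars.upperChar ch else ch], st.2))
      (acc, true)
    = (acc ++ (suf.filter (· ≠ ' ')).map PySem.Chars.upperChar, true) := by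
  induction suf generalizing acc with
  | nil => simp
  | cons c t ih =>
    by_cases hc : c = ' '
    · subst hc; simp [ih]
    · simp only [List.foldl_cons, if_neg hc, if_true]
      rw [ih (acc ++ [PySem.Chars.upperChar c])]
      simp [hc]

-- ===== VERDICT (by name: the statement is the Claim_ definition above) =====
theorem keywordToFunction_py_spec : Claim_equal_keywordToFunction_py := by
  intro keyword _
  unfold Spec_keywordToFunction_py keywordToFunction_py keywordToFunction_py_alt
  by_cases hin : PySem.Str.isIn " " keyword = false
  · rw [if_pos hin, if_pos hin]
  · rw [if_neg hin, if_neg hin]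
    have hmem : ' ' ∈ keyword.toList := by
      have h : PySem.Chars.isIn [' '] keyword.toList = true := by
        have := eq_true_of_ne_false hin
        simpa [PySem.Str.isIn_eq] using this
      rcases (PySem.Chars.isIn_iff_infix [' '] keyword.toList).mp h with ⟨s, t, heq⟩
      exact heq ▸ (by simp)
    obtain ⟨k, hk⟩ := Option.isSome_iff_exists.mp ((PySem.List.index?_isSome_iff _ _).mpr hmem)
    rcases (PySem.List.index?_eq_some_iff _ _ _).mp hk with ⟨pre, suf, hcs, hlen, hpre⟩
    have hfind : PySem.Str.find keyword " " = (pre.length : Int) := by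
      rw [PySem.Str.find_eq]
      show PySem.Chars.find keyword.toList (" ".toList) = (pre.length : Int)
      rw [show (" ".toList) = [' '] from rfl, PySem.Chars.find, hcs]
      simpa using pv_find_go pre suf 0 hpre
    rw [hfind]
    -- B side: slices
    have hslice1 : PySem.Chars.slice keyword.toList none (some (pre.length : Int)) = pre := by
      rw [PySem.Chars.slice_eq_listSlice, PySem.List.slice_to_natCast, hcs, List.take_left]
    have hslice2 : PySem.Chars.slice keyword.toList (some ((pre.length : Int) + 1)) none = suf := by
      rw [PySem.Chars.slice_eq_listSlice,
        show ((pre.length : Int) + 1) = ((pre.length + 1 : Nat) : Int) from by push_cast; ring,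
        PySem.List.slice_from_natCast, hcs]
      rw [show pre ++ ' ' :: suf = (pre ++ [' ']) ++ suf from by simp]
      exact List.drop_left' (by simp)
    show _ = String.ofList (PySem.Chars.slice keyword.toList none (some (pre.length : Int))) ++
        PySem.Str.upper (PySem.Str.replace
          (String.ofList (PySem.Chars.slice keyword.toList (some ((pre.length : Int) + 1)) none)) " " "")
    rw [hslice1, hslice2]
    -- A side: the loop
    rw [hcs, pv_loopA_pre pre (' ' :: suf) [] hpre]
    simp only [List.nil_append, List.foldl_cons, if_true]
    rw [pv_loopA_after suf pre]
    -- both sides as String.ofList of the same list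
    simp only [PySem.Str.replace, PySem.Str.upper, String.toList_ofList]
    rw [show ((" " : String).toList) = [' '] from rfl, show (("" : String).toList) = [] from rfl,
      pv_replace_space, PySem.Chars.upper]
    simp
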